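-- pv_equiv track=rewrite | github.com/Goddess-luo/Measurement-of-cable-spacing-and-tunnel-linear-length | Pro_code/tunnel_dis.py | check_inside_longest_space
-- ===== SOURCE A (Python) =====
-- def check_inside_longest_space(list):  # 找到通道内部的平行最长距离
--     max_space = 1  # 初始化一个最大距离，方便后面对比
--     space = 1
--     for index1 in range(1, len(list[0])):
--         up = list[0][index1]  # 找到当前位置的天花板高度
--         down = list[1][index1]  # 找到当前位置的地面高度
--         for item in range(down + 1, up + 1):  # 通道高度在天花板和地面之间
--             for index2 in range(1, len(list[0]) - index1 + 1):  # 往后推移位置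
--                 if index2 != len(list[0]) - index1:  # 还没到通道最后
--                     if list[1][index1 + index2] < item <= list[0][index1 + index2]: # 如果当前的高度大于后一位的地面，小于和后一位的天花板
--                         space += 1  # 就把距离+1
--                     else:
--                         if space > max_space:  # 当此时的高度不符合条件时，将它的水平距离与最大值对比
--                             max_space = space  # 如果此时的水平距离更大，则取代原来的最大距离
--                         space = 1  # 复位原始距离，方便下一个高度计算水平距离
--                         break  # 结束循环，跳到更上一层的高度
--                 else:  # 到达通道最后
--                     if space > max_space:  # 同样与最大距离对比
--                         max_space = space  # 更大则取代
--                     space = 1  # 复位原始距离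
--                     break  # 结束循环，跳到更上一层的高度
--     return max_space
-- ===== SOURCE B (Python) =====
-- def check_inside_longest_space(list):
--     # For each start column, grow the run while the window still admits an
--     # integer height: the running max-floor must stay below the running
--     # min-ceiling (no per-height scanning).
--     n = len(list[0])
--     if n <= 1:
--         return 1
--     ceil, floor = list[0], list[1]
--     best = 1
--     for i in range(1, n):
--         lo, hi = floor[i], ceil[i]
--         if lo >= hi:
--             continue
--         j = i + 1
--         while j < n:
--             nlo = max(lo, floor[j])
--             nhi = min(hi, ceil[j])
--             if nlo >= nhi:
--                 break
--             lo, hi = nlo, nhi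
--             j += 1
--         if j - i > best:
--             best = j - i
--     return best
-- ===== Notes on version B (the rewrite author's own statement) =====
-- stated objective: faster
-- what changed: A tries every integer height between a column's floor and ceiling and rescans the columns to its right for each height; B extends a window from each start column once, keeping a running max-floor and min-ceiling, so the per-height loop and its rescans disappear.
import Mathlib
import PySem

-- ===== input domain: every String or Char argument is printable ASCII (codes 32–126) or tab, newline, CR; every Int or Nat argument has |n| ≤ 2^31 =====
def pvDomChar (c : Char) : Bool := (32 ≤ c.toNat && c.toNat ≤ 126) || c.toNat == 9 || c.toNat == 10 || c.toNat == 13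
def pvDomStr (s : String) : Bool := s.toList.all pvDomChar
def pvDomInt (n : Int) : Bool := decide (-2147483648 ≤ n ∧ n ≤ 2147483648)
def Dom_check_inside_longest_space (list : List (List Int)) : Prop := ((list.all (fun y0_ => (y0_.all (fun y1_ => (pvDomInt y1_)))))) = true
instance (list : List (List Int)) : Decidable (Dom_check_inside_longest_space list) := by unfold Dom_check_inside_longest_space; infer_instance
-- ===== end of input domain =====

-- B replaces A's scan over every candidate integer height by a per-start window
-- extension tracking the running max-floor / min-ceiling (objective: faster).

-- ===== PORT A =====
-- inner `for index2 in range(...)` loop with its two `break`s; state = (max_space, space)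
def pvAInner (c f : List Int) (n i item : Int) : List Int → Int × Int → Int × Int
  | [], s => s
  | idx2 :: rest, (ms, sp) =>
    if idx2 ≠ n - i then
      if PySem.List.pyGetD f (i + idx2) 0 < item ∧ item ≤ PySem.List.pyGetD c (i + idx2) 0 then
        pvAInner c f n i item rest (ms, sp + 1)
      else ((if sp > ms then sp else ms), 1)
    else ((if sp > ms then sp else ms), 1)

def check_inside_longest_space (list : List (List Int)) : Int :=
  let c := PySem.List.pyGetD list 0 []
  let f := PySem.List.pyGetD list 1 []
  let n : Int := (c.length : Int)
  let s := (PySem.List.pyRange 1 n).foldl (fun s i1 =>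
    let up := PySem.List.pyGetD c i1 0
    let down := PySem.List.pyGetD f i1 0
    (PySem.List.pyRange (down + 1) (up + 1)).foldl
      (fun s2 item => pvAInner c f n i1 item (PySem.List.pyRange 1 (n - i1 + 1)) s2) s)
    (1, 1)
  s.1

-- ===== PORT B =====
-- B's `while j < n` window-extension loop
def pvBLoop (c f : List Int) (n j : Nat) (lo hi : Int) : Nat :=
  if hj : j < n then
    let nlo := max lo (f.getD j 0)
    let nhi := min hi (c.getD j 0)
    if nlo ≥ nhi then j else pvBLoop c f n (j + 1) nlo nhi
  else j
termination_by n - j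

def check_inside_longest_space_alt (list : List (List Int)) : Int :=
  let n := (list.getD 0 []).length
  if n ≤ 1 then 1
  else
    let c := list.getD 0 []
    let f := list.getD 1 []
    (List.range' 1 (n - 1)).foldl (fun best i =>
      let lo := f.getD i 0
      let hi := c.getD i 0
      if lo ≥ hi then best
      else
        let j := pvBLoop c f n (i + 1) lo hi
        if (j : Int) - (i : Int) > best then (j : Int) - (i : Int) else best) 1

-- ===== PRECONDITION & SPEC =====
-- Pre_ excludes exactly the inputs where the Python A raises IndexError: the empty
-- list, and lists whose first row has ≥ 2 entries but which lack a second row at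
-- least as long as the first.
def Pre_check_inside_longest_space (list : List (List Int)) : Prop :=
  list ≠ [] ∧ ((list.getD 0 []).length ≤ 1 ∨
    (2 ≤ list.length ∧ (list.getD 0 []).length ≤ (list.getD 1 []).length))
instance (list : List (List Int)) : Decidable (Pre_check_inside_longest_space list) := by
  unfold Pre_check_inside_longest_space; infer_instance

def pvWitness_check_inside_longest_space : List (List Int) := [[0, 5, 4], [0, 1, 2]]

def Spec_check_inside_longest_space (list : List (List Int)) (out : Int) : Prop := out = check_inside_longest_space_alt list
instance (list : List (List Int)) (out : Int) : Decidable (Spec_check_inside_longest_space list out) := by unfold Spec_check_inside_longest_space; infer_instance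

-- ===== CLAIM (what is proved, stated in full; the proofs are below) =====
def Claim_equal_check_inside_longest_space : Prop := ∀ (list : List (List Int)), Dom_check_inside_longest_space list → Pre_check_inside_longest_space list → Spec_check_inside_longest_space list (check_inside_longest_space list)

-- ===== LEMMAS AND PROOFS =====

-- length of the run of positions starting at j (up to the end of c) on which the
-- height h fits strictly above the floor and at most the ceiling
def pvPref (c f : List Int) (h : Int) (j : Nat) : Nat :=
  if hj : j < c.length then
    (if f.getD j 0 < h ∧ h ≤ c.getD j 0 then pvPref c f h (j + 1) + 1 else 0)
  else 0
termination_by c.length - j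

theorem pvPref_pos (c f : List Int) (h : Int) (j : Nat) (hj : j < c.length) :
    pvPref c f h j = if f.getD j 0 < h ∧ h ≤ c.getD j 0 then pvPref c f h (j + 1) + 1 else 0 := by
  rw [pvPref, dif_pos hj]

theorem pvPref_neg (c f : List Int) (h : Int) (j : Nat) (hj : ¬ j < c.length) :
    pvPref c f h j = 0 := by
  rw [pvPref, dif_neg hj]

theorem pvBLoop_pos (c f : List Int) {n j : Nat} (lo hi : Int) (hj : j < n) :
    pvBLoop c f n j lo hi =
      if max lo (f.getD j 0) ≥ min hi (c.getD j 0) then j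
      else pvBLoop c f n (j + 1) (max lo (f.getD j 0)) (min hi (c.getD j 0)) := by
  rw [pvBLoop, dif_pos hj]

theorem pvBLoop_neg (c f : List Int) {n j : Nat} (lo hi : Int) (hj : ¬ j < n) :
    pvBLoop c f n j lo hi = j := by
  rw [pvBLoop, dif_neg hj]

theorem pvRange_nil {a b : Int} (h : b ≤ a) : PySem.List.pyRange a b = [] := by
  rw [PySem.List.pyRange_of_pos a b Int.one_pos]
  simp [Int.not_lt.mpr h]

theorem pvBLoop_ge_self (c f : List Int) :
    ∀ (m j : Nat) (lo hi : Int), c.length - j ≤ m →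
      j ≤ pvBLoop c f c.length j lo hi := by
  intro m
  induction m with
  | zero =>
    intro j lo hi hm
    rw [pvBLoop_neg c f lo hi (by omega)]
  | succ m ih =>
    intro j lo hi hm
    by_cases hj : j < c.length
    · rw [pvBLoop_pos c f lo hi hj]
      by_cases hc2 : max lo (f.getD j 0) ≥ min hi (c.getD j 0)
      · rw [if_pos hc2]
      · rw [if_neg hc2]
        exact le_trans (Nat.le_succ j) (ih (j + 1) _ _ (by omega))
    · rw [pvBLoop_neg c f lo hi hj]

theorem pvBLoop_ge (c f : List Int) :
    ∀ (m j : Nat) (lo hi h : Int), c.length - j ≤ m → lo < h → h ≤ hi →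
      j + pvPref c f h j ≤ pvBLoop c f c.length j lo hi := by
  intro m
  induction m with
  | zero =>
    intro j lo hi h hm _ _
    rw [pvPref_neg c f h j (by omega), pvBLoop_neg c f lo hi (by omega)]
    omega
  | succ m ih =>
    intro j lo hi h hm hlo hhi
    by_cases hj : j < c.length
    · by_cases hok : f.getD j 0 < h ∧ h ≤ c.getD j 0
      · rw [pvPref_pos c f h j hj, if_pos hok, pvBLoop_pos c f lo hi hj]
        have h1 : max lo (f.getD j 0) < h := max_lt hlo hok.1
        have h2 : h ≤ min hi (c.getD j 0) := le_min hhi hok.2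
        rw [if_neg (not_le.mpr (lt_of_lt_of_le h1 h2))]
        have := ih (j + 1) _ _ h (by omega) h1 h2
        omega
      · rw [pvPref_pos c f h j hj, if_neg hok]
        have := pvBLoop_ge_self c f (m + 1) j lo hi hm
        omega
    · rw [pvPref_neg c f h j hj]
      have := pvBLoop_ge_self c f (m + 1) j lo hi hm
      omega

theorem pvBLoop_ex (c f : List Int) :
    ∀ (m j : Nat) (lo hi : Int), c.length - j ≤ m → lo < hi →
      ∃ h, lo < h ∧ h ≤ hi ∧ pvBLoop c f c.length j lo hi ≤ j + pvPref c f h j := by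
  intro m
  induction m with
  | zero =>
    intro j lo hi hm hlh
    refine ⟨hi, hlh, le_refl hi, ?_⟩
    rw [pvBLoop_neg c f lo hi (by omega)]
    omega
  | succ m ih =>
    intro j lo hi hm hlh
    by_cases hj : j < c.length
    · rw [pvBLoop_pos c f lo hi hj]
      by_cases hcond : max lo (f.getD j 0) ≥ min hi (c.getD j 0)
      · rw [if_pos hcond]
        exact ⟨hi, hlh, le_refl hi, by omega⟩
      · rw [if_neg hcond]
        obtain ⟨h, hh1, hh2, hh3⟩ := ih (j + 1) _ _ (by omega) (lt_of_not_ge hcond)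
        have e1 := le_max_left lo (f.getD j 0)
        have e2 := le_max_right lo (f.getD j 0)
        have e3 := min_le_left hi (c.getD j 0)
        have e4 := min_le_right hi (c.getD j 0)
        refine ⟨h, by omega, by omega, ?_⟩
        rw [pvPref_pos c f h j hj, if_pos ⟨by omega, by omega⟩]
        omega
    · rw [pvBLoop_neg c f lo hi hj]
      exact ⟨hi, hlh, le_refl hi, by rw [pvPref_neg c f hi j hj]; omega⟩

theorem pvFoldl_max_le (g : Int → Int) :
    ∀ (l : List Int) (a : Int), (∀ x ∈ l, g x ≤ a) →
      l.foldl (fun b x => max b (g x)) a = a := by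
  intro l
  induction l with
  | nil => intro a _; rfl
  | cons x xs ih =>
    intro a hle
    simp only [List.foldl_cons]
    rw [max_eq_left (hle x (by simp))]
    exact ih a (fun y hy => hle y (by simp [hy]))

theorem pvFoldl_max_eq (g : Int → Int) (V : Int) :
    ∀ (l : List Int) (ms : Int), (∀ x ∈ l, g x ≤ V) → (∃ x ∈ l, V ≤ g x) →
      l.foldl (fun a x => max a (g x)) ms = max ms V := by
  intro l
  induction l with
  | nil => intro ms _ hex; simp at hex
  | cons x xs ih =>
    intro ms hle hex
    simp only [List.foldl_cons]
    by_cases hx : ∃ y ∈ xs, V ≤ g y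
    · rw [ih (max ms (g x)) (fun y hy => hle y (by simp [hy])) hx]
      have : g x ≤ V := hle x (by simp)
      rw [max_assoc, max_eq_right this]
    · have hgx : V ≤ g x := by
        obtain ⟨y, hy, hVy⟩ := hex
        rcases List.mem_cons.mp hy with rfl | hy'
        · exact hVy
        · exact absurd ⟨y, hy', hVy⟩ hx
      have hgx' : g x = V := le_antisymm (hle x (by simp)) hgx
      rw [hgx', pvFoldl_max_le]
      intro y hy
      exact le_trans (hle y (by simp [hy])) (le_max_right ms V)

theorem pvAInner_eval (c f : List Int) (i : Nat) (item : Int) :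
    ∀ (m : Nat), ∀ (k : Nat) (ms sp : Int), 1 ≤ k → i + k ≤ c.length → c.length - (i + k) = m →
      pvAInner c f (c.length : Int) (i : Int) item
        (PySem.List.pyRange (k : Int) ((c.length : Int) - (i : Int) + 1)) (ms, sp)
      = (max ms (sp + (pvPref c f item (i + k) : Int)), 1) := by
  intro m
  induction m with
  | zero =>
    intro k ms sp hk1 hkn hm
    rw [PySem.List.pyRange_one_cons (by omega : (k : Int) < (c.length : Int) - (i : Int) + 1)]
    rw [pvAInner, if_neg (by omega : ¬((k : Int) ≠ (c.length : Int) - (i : Int)))]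
    rw [pvPref_neg c f item (i + k) (by omega)]
    simp only [Nat.cast_zero, add_zero, Prod.mk.injEq, and_true]
    rw [max_def]
    split_ifs <;> omega
  | succ m ih =>
    intro k ms sp hk1 hkn hm
    have hklt : i + k < c.length := by omega
    rw [PySem.List.pyRange_one_cons (by omega : (k : Int) < (c.length : Int) - (i : Int) + 1)]
    rw [pvAInner, if_pos (by omega : ((k : Int) ≠ (c.length : Int) - (i : Int)))]
    rw [show (i : Int) + (k : Int) = ((i + k : Nat) : Int) by push_cast; ring]
    rw [PySem.List.pyGetD_natCast, PySem.List.pyGetD_natCast]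
    by_cases hok : f.getD (i + k) 0 < item ∧ item ≤ c.getD (i + k) 0
    · rw [if_pos hok]
      rw [show ((k : Int) + 1) = ((k + 1 : Nat) : Int) by push_cast; ring]
      rw [ih (k + 1) ms (sp + 1) (by omega) (by omega) (by omega)]
      rw [pvPref_pos c f item (i + k) hklt, if_pos hok]
      rw [show i + (k + 1) = i + k + 1 by omega]
      simp only [Prod.mk.injEq, and_true]
      congr 1
      push_cast
      ring
    · rw [if_neg hok, pvPref_pos c f item (i + k) hklt, if_neg hok]
      simp only [Nat.cast_zero, add_zero, Prod.mk.injEq, and_true]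
      rw [max_def]
      split_ifs <;> omega

theorem pvHFold (c f : List Int) (i : Nat) (hin : i < c.length) :
    ∀ (l : List Int) (ms : Int),
      l.foldl (fun s2 item => pvAInner c f (c.length : Int) (i : Int) item
          (PySem.List.pyRange 1 ((c.length : Int) - (i : Int) + 1)) s2) (ms, 1)
      = (l.foldl (fun a item => max a (1 + (pvPref c f item (i + 1) : Int))) ms, 1) := by
  intro l
  induction l with
  | nil => intro ms; rfl
  | cons x xs ih =>
    intro ms
    simp only [List.foldl_cons]
    have h := pvAInner_eval c f i x (c.length - (i + 1)) 1 ms 1 le_rfl (by omega) rfl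
    push_cast at h
    rw [h]
    exact ih _

theorem pvIStep (c f : List Int) (i : Nat) (ms : Int) (hin : i < c.length) :
    (PySem.List.pyRange (PySem.List.pyGetD f (i : Int) 0 + 1) (PySem.List.pyGetD c (i : Int) 0 + 1)).foldl
      (fun s2 item => pvAInner c f (c.length : Int) (i : Int) item
        (PySem.List.pyRange 1 ((c.length : Int) - (i : Int) + 1)) s2) (ms, 1)
    = (if f.getD i 0 ≥ c.getD i 0 then ms
       else if ((pvBLoop c f c.length (i + 1) (f.getD i 0) (c.getD i 0) : Nat) : Int) - (i : Int) > ms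
            then ((pvBLoop c f c.length (i + 1) (f.getD i 0) (c.getD i 0) : Nat) : Int) - (i : Int)
            else ms, 1) := by
  rw [PySem.List.pyGetD_natCast f i 0, PySem.List.pyGetD_natCast c i 0]
  by_cases hdu : f.getD i 0 ≥ c.getD i 0
  · rw [if_pos hdu, pvRange_nil (a := f.getD i 0 + 1) (b := c.getD i 0 + 1) (by omega)]
    rfl
  · rw [if_neg hdu, pvHFold c f i hin]
    have hjge : i + 1 ≤ pvBLoop c f c.length (i + 1) (f.getD i 0) (c.getD i 0) :=
      pvBLoop_ge_self c f c.length (i + 1) _ _ (by omega)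
    have hfm := pvFoldl_max_eq (fun item => 1 + (pvPref c f item (i + 1) : Int))
      (((pvBLoop c f c.length (i + 1) (f.getD i 0) (c.getD i 0) : Nat) : Int) - (i : Int))
      (PySem.List.pyRange (f.getD i 0 + 1) (c.getD i 0 + 1)) ms
      (by
        intro x hx
        rw [PySem.List.mem_pyRange_one] at hx
        have hb := pvBLoop_ge c f c.length (i + 1) (f.getD i 0) (c.getD i 0) x (by omega)
          (by omega) (by omega)
        simp only []
        omega)
      (by
        obtain ⟨h, hh1, hh2, hh3⟩ := pvBLoop_ex c f c.length (i + 1) (f.getD i 0) (c.getD i 0)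
          (by omega) (by omega)
        exact ⟨h, by rw [PySem.List.mem_pyRange_one]; omega, by simp only []; omega⟩)
    simp only [] at hfm
    rw [hfm]
    simp only [Prod.mk.injEq, and_true]
    rw [max_def]
    split_ifs <;> omega

theorem pvOuter (c f : List Int) :
    ∀ (l : List Nat), (∀ x ∈ l, x < c.length) → ∀ (ms : Int),
      ((l.map (fun (k : Nat) => (k : Int))).foldl
        (fun s i1 =>
          (PySem.List.pyRange (PySem.List.pyGetD f i1 0 + 1) (PySem.List.pyGetD c i1 0 + 1)).foldl
            (fun s2 item => pvAInner c f (c.length : Int) i1 item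
              (PySem.List.pyRange 1 ((c.length : Int) - i1 + 1)) s2) s) (ms, 1))
      = (l.foldl (fun best i =>
          if f.getD i 0 ≥ c.getD i 0 then best
          else
            if ((pvBLoop c f c.length (i + 1) (f.getD i 0) (c.getD i 0) : Nat) : Int) - (i : Int) > best
            then ((pvBLoop c f c.length (i + 1) (f.getD i 0) (c.getD i 0) : Nat) : Int) - (i : Int)
            else best) ms, 1) := by
  intro l
  induction l with
  | nil => intro _ ms; rfl
  | cons x xs ih =>
    intro hmem ms
    simp only [List.map_cons, List.foldl_cons]
    rw [pvIStep c f x ms (hmem x (by simp))]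
    exact ih (fun y hy => hmem y (by simp [hy])) _

theorem pvCastRange (n : Nat) (hn : 1 ≤ n) :
    PySem.List.pyRange 1 (n : Int) = (List.range' 1 (n - 1)).map (fun (k : Nat) => (k : Int)) := by
  rw [PySem.List.pyRange_of_pos _ _ Int.one_pos]
  by_cases h1 : 1 < n
  · rw [if_pos (by omega : (1 : Int) < (n : Int))]
    rw [show (((n : Int) - 1 + 1 - 1) / 1).toNat = n - 1 by omega]
    rw [List.range'_eq_map_range, List.map_map]
    apply List.map_congr_left
    intro a _
    simp only [Function.comp_apply]
    push_cast
    ring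
  · rw [if_neg (by omega : ¬ (1 : Int) < (n : Int))]
    rw [show n - 1 = 0 by omega]
    simp

theorem pvPortsEq (list : List (List Int)) :
    check_inside_longest_space list = check_inside_longest_space_alt list := by
  have hA : check_inside_longest_space list =
      ((PySem.List.pyRange 1 (((PySem.List.pyGetD list 0 []).length : Nat) : Int)).foldl
        (fun s i1 =>
          (PySem.List.pyRange (PySem.List.pyGetD (PySem.List.pyGetD list 1 []) i1 0 + 1)
              (PySem.List.pyGetD (PySem.List.pyGetD list 0 []) i1 0 + 1)).foldl
            (fun s2 item => pvAInner (PySem.List.pyGetD list 0 []) (PySem.List.pyGetD list 1 [])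
              (((PySem.List.pyGetD list 0 []).length : Nat) : Int) i1 item
              (PySem.List.pyRange 1 ((((PySem.List.pyGetD list 0 []).length : Nat) : Int) - i1 + 1)) s2) s)
        (1, 1)).1 := rfl
  have hB : check_inside_longest_space_alt list =
      (if (list.getD 0 []).length ≤ 1 then (1 : Int)
       else
        (List.range' 1 ((list.getD 0 []).length - 1)).foldl (fun best i =>
          if (list.getD 1 []).getD i 0 ≥ (list.getD 0 []).getD i 0 then best
          else
            if ((pvBLoop (list.getD 0 []) (list.getD 1 []) (list.getD 0 []).length (i + 1)
                  ((list.getD 1 []).getD i 0) ((list.getD 0 []).getD i 0) : Nat) : Int) - (i : Int) > best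
            then ((pvBLoop (list.getD 0 []) (list.getD 1 []) (list.getD 0 []).length (i + 1)
                  ((list.getD 1 []).getD i 0) ((list.getD 0 []).getD i 0) : Nat) : Int) - (i : Int)
            else best) 1) := rfl
  rw [hA, hB, PySem.List.pyGetD_ofNat' list 0 [], PySem.List.pyGetD_ofNat' list 1 []]
  by_cases hn : (list.getD 0 []).length ≤ 1
  · rw [if_pos hn, pvRange_nil (a := 1) (b := ((list.getD 0 []).length : Int)) (by omega)]
    rfl
  · rw [if_neg hn]
    rw [pvCastRange (list.getD 0 []).length (by omega)]
    rw [pvOuter (list.getD 0 []) (list.getD 1 []) (List.range' 1 ((list.getD 0 []).length - 1))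
      (fun x hx => by rw [List.mem_range'_1] at hx; omega) 1]

-- ===== VERDICT (by name: the statement is the Claim_ definition above) =====
theorem check_inside_longest_space_spec : Claim_equal_check_inside_longest_space := by
  intro list _ _
  unfold Spec_check_inside_longest_space
  exact pvPortsEq list
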